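-- pv_equiv track=rewrite | github.com/gabewillen/monoid-embed | scripts/run_embed_bench.py | _evict_cache
-- ===== SOURCE A (Python) =====
-- def _evict_cache(bytes_to_touch: int) -> int:
--     if bytes_to_touch <= 0:
--         return 0
--     buf = bytearray(bytes_to_touch)
--     step = 4096
--     total = 0
--     for idx in range(0, len(buf), step):
--         buf[idx] = (buf[idx] + 1) & 0xFF
--         total += buf[idx]
--     return total
-- ===== SOURCE B (Python) =====
-- def _evict_cache(bytes_to_touch: int) -> int:
--     if bytes_to_touch <= 0:
--         return 0
--     return (bytes_to_touch + 4095) // 4096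
-- ===== Notes on version B (the rewrite author's own statement) =====
-- stated objective: faster
-- what changed: The buffer allocation and the touch loop are replaced by a closed form: each touched index contributes exactly one to the total, so the result is the ceiling of bytes_to_touch/4096, computed as (bytes_to_touch + 4095) // 4096.
import Mathlib
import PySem

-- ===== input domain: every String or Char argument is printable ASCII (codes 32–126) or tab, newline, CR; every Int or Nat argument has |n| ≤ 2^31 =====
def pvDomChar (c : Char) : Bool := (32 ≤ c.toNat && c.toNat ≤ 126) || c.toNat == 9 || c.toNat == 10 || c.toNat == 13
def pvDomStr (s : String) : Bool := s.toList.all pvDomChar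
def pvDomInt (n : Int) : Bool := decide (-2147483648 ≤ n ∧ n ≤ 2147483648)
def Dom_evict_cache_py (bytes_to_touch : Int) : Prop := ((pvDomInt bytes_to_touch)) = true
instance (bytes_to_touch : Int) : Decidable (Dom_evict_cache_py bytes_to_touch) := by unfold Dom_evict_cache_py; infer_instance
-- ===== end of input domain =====

-- B replaces A's allocate-and-touch loop by the closed form (n + 4095) // 4096 (the loop adds 1 per touched index).

-- ===== PORT A =====
-- one iteration of A's loop: read buf[idx], increment mod 256, write back, add to total
def evictStep (st : List Int × Int) (idx : Int) : List Int × Int :=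
  let v := PySem.Int.band (PySem.List.pyGetD st.1 idx 0 + 1) 255
  (PySem.List.pySetD st.1 idx v, st.2 + v)

def evict_cache_py (bytes_to_touch : Int) : Int :=
  if bytes_to_touch ≤ 0 then 0
  else
    let buf : List Int := List.replicate bytes_to_touch.toNat 0
    let step : Int := 4096
    ((PySem.List.pyRange 0 (buf.length : Int) step).foldl evictStep (buf, 0)).2

-- ===== PORT B =====
def evict_cache_py_alt (bytes_to_touch : Int) : Int :=
  if bytes_to_touch ≤ 0 then 0
  else PySem.Int.floordiv (bytes_to_touch + 4095) 4096

-- ===== PRECONDITION & SPEC =====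
def Spec_evict_cache_py (bytes_to_touch : Int) (out : Int) : Prop := out = evict_cache_py_alt bytes_to_touch
instance (bytes_to_touch : Int) (out : Int) : Decidable (Spec_evict_cache_py bytes_to_touch out) := by unfold Spec_evict_cache_py; infer_instance

-- ===== CLAIM (what is proved, stated in full; the proofs are below) =====
def Claim_equal_evict_cache_py : Prop := ∀ (bytes_to_touch : Int), Dom_evict_cache_py bytes_to_touch → Spec_evict_cache_py bytes_to_touch (evict_cache_py bytes_to_touch)

-- ===== LEMMAS AND PROOFS =====

-- Loop invariant: over a strictly increasing list of nonnegative indices at which the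
-- buffer still reads 0, each iteration of A's loop contributes exactly 1 to the total.
lemma fold_count : ∀ (l : List Int) (buf : List Int) (total : Int),
    (∀ i ∈ l, 0 ≤ i ∧ buf.getD i.toNat 0 = 0) → l.Pairwise (· < ·) →
    (l.foldl evictStep (buf, total)).2 = total + l.length := by
  intro l
  induction l with
  | nil => intro buf total _ _; simp
  | cons a t ih =>
    intro buf total h hp
    obtain ⟨ha0, hread⟩ := h a (by simp)
    have hv : PySem.Int.band (PySem.List.pyGetD buf a 0 + 1) 255 = 1 := by
      rw [PySem.List.pyGetD_of_nonneg buf 0 ha0, hread]; decide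
    have hstep : evictStep (buf, total) a = (buf.set a.toNat 1, total + 1) := by
      simp [evictStep, hv, PySem.List.pySetD_of_nonneg buf 1 ha0]
    rw [List.foldl_cons, hstep,
      ih _ _ (by
        intro i hi
        obtain ⟨hi0, hg⟩ := h i (by simp [hi])
        have hlt : a < i := (List.pairwise_cons.mp hp).1 i hi
        refine ⟨hi0, ?_⟩
        rw [List.getD_eq_getElem?_getD, List.getElem?_set_ne (by omega)]
        rw [List.getD_eq_getElem?_getD] at hg
        exact hg) (List.pairwise_cons.mp hp).2]
    simp; omega

theorem evict_eq (n : Int) : evict_cache_py n = evict_cache_py_alt n := by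
  unfold evict_cache_py evict_cache_py_alt
  by_cases hn : n ≤ 0
  · simp [hn]
  · simp only [if_neg hn]
    have hpos : (0:Int) < 4096 := by decide
    have hlen : ((List.replicate n.toNat (0:Int)).length : Int) = n := by
      simp; omega
    rw [hlen]
    rw [fold_count _ _ _ (by
        intro i hi
        have := (PySem.List.mem_pyRange_iff_of_pos hpos i).mp hi
        refine ⟨this.1, ?_⟩
        simp [List.getD_eq_getElem?_getD, List.getElem?_replicate]
        split <;> rfl)
      (by
        rw [PySem.List.pyRange_of_pos 0 n hpos]
        refine List.Pairwise.map _ ?_ List.pairwise_lt_range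
        intro x y hxy; omega)]
    rw [PySem.List.pyRange_of_pos 0 n hpos]
    rw [PySem.Int.floordiv_eq_ediv_of_pos hpos]
    simp only [List.length_map, List.length_range]
    split
    · push_cast [Int.toNat_of_nonneg (by omega : (0:Int) ≤ (n - 0 + 4096 - 1) / 4096)]
      omega
    · omega

-- ===== VERDICT (by name: the statement is the Claim_ definition above) =====
theorem evict_cache_py_spec : Claim_equal_evict_cache_py := by
  intro n _
  exact evict_eq n
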